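-- pv_equiv track=rewrite | github.com/ReviewEdge/Reminder-Screen | RASPI_v2_reminder_screen.py | assign_screens
-- ===== SOURCE A (Python) =====
-- def assign_screens(list_of_lines):
--     screen_lines = list_of_lines
--     if len(list_of_lines) > 4:
--         grabfrom_indexes = []
--         start_val = 0
--         end_val = 4
--         counter = 0
--         for i in range(len(screen_lines) - 3):
--             slice_poses = [start_val, end_val]
--             grabfrom_indexes.append(slice_poses)
--             start_val += 1
--             end_val += 1
--             counter += 1
--
--     else:
--         grabfrom_indexes = [[0, len(screen_lines)]]
--
--     screen_pack_temp = []
--     for i in grabfrom_indexes: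
--         screen = ""
--         for cell in screen_lines[i[0]:i[1]]:
--             if cell == screen_lines[i[1]-1]:
--                 screen += cell
--             else:
--                 screen += cell + "\n"
--         screen_pack_temp.append(screen)
--
--     return screen_pack_temp
-- ===== SOURCE B (Python) =====
-- def _render(w, last):
--     if not w:
--         return ""
--     c = w[0]
--     return (c if c == last else c + "\n") + _render(w[1:], last)
--
--
-- def assign_screens(list_of_lines):
--     out = []
--     i = 0
--     while len(list_of_lines) - i > 4:
--         w = list_of_lines[i:i+4]
--         out.append(_render(w, w[3]))
--         i += 1
--     tail = list_of_lines[i:]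
--     out.append(_render(tail, tail[-1] if tail else None))
--     return out
-- ===== Notes on version B (the rewrite author's own statement) =====
-- stated objective: alternative
-- what changed: B replaces A's two-phase design (build a start/end index-pair table with running counters, then slice and '+=' per pair) by a single emit-as-you-go cursor loop that appends each screen as the cursor advances, with a recursive renderer that prepends each cell to the rendered tail; the trailing whole-window case is the loop epilogue instead of a separate table branch.
import Mathlib
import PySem

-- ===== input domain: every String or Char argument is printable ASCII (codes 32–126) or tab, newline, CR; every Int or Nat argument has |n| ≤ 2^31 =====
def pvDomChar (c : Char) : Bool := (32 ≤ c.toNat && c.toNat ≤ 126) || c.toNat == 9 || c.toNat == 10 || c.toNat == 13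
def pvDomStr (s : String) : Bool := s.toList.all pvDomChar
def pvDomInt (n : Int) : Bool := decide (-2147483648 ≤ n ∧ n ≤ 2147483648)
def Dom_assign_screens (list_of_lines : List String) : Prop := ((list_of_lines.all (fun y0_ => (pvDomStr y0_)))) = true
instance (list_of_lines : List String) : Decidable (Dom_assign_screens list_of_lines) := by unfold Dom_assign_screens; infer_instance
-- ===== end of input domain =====

-- B replaces A's index-pair table + slice-and-append phases by one head-peeling consume
-- loop with a recursive per-screen renderer; objective: alternative decomposition.

-- ===== PORT A =====
def assign_screens (list_of_lines : List String) : List String :=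
  let screen_lines := list_of_lines
  let grabfrom_indexes : List (Int × Int) :=
    if (4 : Int) < (list_of_lines.length : Int) then
      ((PySem.List.pyRange 0 ((screen_lines.length : Int) - 3) 1).foldl
        (fun (st : (List (Int × Int)) × Int × Int × Int) _ =>
          let slice_poses := (st.2.1, st.2.2.1)
          (st.1 ++ [slice_poses], st.2.1 + 1, st.2.2.1 + 1, st.2.2.2 + 1))
        ([], 0, 4, 0)).1
    else [(0, (screen_lines.length : Int))]
  grabfrom_indexes.foldl (fun screen_pack_temp i =>
    let screen := (PySem.List.slice screen_lines (some i.1) (some i.2)).foldl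
      (fun screen cell =>
        if some cell = PySem.List.pyGet? screen_lines (i.2 - 1) then screen ++ cell
        else screen ++ cell ++ "\n") ""
    screen_pack_temp ++ [screen]) []

-- ===== PORT B =====
-- _render: prepend each cell (with '\n' unless equal to `last`) to the rendered tail
def renderB : List String → Option String → String
  | [], _ => ""
  | c :: rest, last => (if some c = last then c else c ++ "\n") ++ renderB rest last

-- the while-loop of Source B: advance cursor i over list_of_lines, appending one screen per step
def altLoopB (l out : List String) (i : Nat) : List String :=
  if _h : (4 : Int) < (l.length : Int) - (i : Int) then
    let w := PySem.List.slice l (some (i : Int)) (some ((i : Int) + 4))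
    altLoopB l (out ++ [renderB w (PySem.List.pyGet? w 3)]) (i + 1)
  else
    let tail := PySem.List.slice l (some (i : Int)) none
    out ++ [renderB tail (PySem.List.pyGet? tail (-1))]
termination_by l.length - i
decreasing_by omega

def assign_screens_alt (list_of_lines : List String) : List String :=
  altLoopB list_of_lines [] 0

-- ===== PRECONDITION & SPEC =====
def Spec_assign_screens (list_of_lines : List String) (out : List String) : Prop := out = assign_screens_alt list_of_lines
instance (list_of_lines : List String) (out : List String) : Decidable (Spec_assign_screens list_of_lines out) := by unfold Spec_assign_screens; infer_instance

-- ===== CLAIM (what is proved, stated in full; the proofs are below) =====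
def Claim_equal_assign_screens : Prop := ∀ (list_of_lines : List String), Dom_assign_screens list_of_lines → Spec_assign_screens list_of_lines (assign_screens list_of_lines)

-- ===== LEMMAS AND PROOFS =====

-- rendered k-th window, used only to connect the two ports
def winB (l : List String) (k : Nat) : String :=
  renderB ((l.drop k).take 4) (PySem.List.pyGet? ((l.drop k).take 4) 3)

-- A's inner '+='-loop over a window equals B's recursive renderer.
theorem pv_renderB (t : Option String) (w : List String) (init : String) :
    w.foldl (fun s c => if some c = t then s ++ c else s ++ c ++ "\n") init
      = init ++ renderB w t := by
  induction w generalizing init with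
  | nil => simp [renderB]
  | cons x xs ih =>
      rw [List.foldl_cons, ih, renderB]
      by_cases h : some x = t <;> simp [h, String.append_assoc]

-- A's index-building loop produces the pairs (s+k, e+k).
theorem pv_buildIdx (r : List Int) (acc : List (Int × Int)) (s e c : Int) :
    ((r.foldl
        (fun (st : (List (Int × Int)) × Int × Int × Int) _ =>
          let slice_poses := (st.2.1, st.2.2.1)
          (st.1 ++ [slice_poses], st.2.1 + 1, st.2.2.1 + 1, st.2.2.2 + 1))
        (acc, s, e, c)).1)
      = acc ++ (List.range r.length).map (fun (k : Nat) => (s + (k : Int), e + (k : Int))) := by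
  induction r generalizing acc s e c with
  | nil => simp
  | cons x xs ih =>
      rw [List.foldl_cons]
      rw [ih, List.length_cons, List.range_succ_eq_map, List.map_cons, List.map_map]
      simp [List.append_assoc]
      intro a _; constructor <;> ring

theorem pv_last (l : List String) :
    PySem.List.pyGet? l ((l.length : Int) - 1) = PySem.List.pyGet? l (-1) := by
  cases l with
  | nil => rfl
  | cons x xs =>
      have h1 : (((x::xs).length : Int) - 1) = (((x::xs).length - 1 : Nat) : Int) := by
        simp
      rw [h1, PySem.List.pyGet?_natCast, PySem.List.pyGet?_neg_one, List.getLast?_eq_getElem?]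

-- on a length-4 window, index 3 is the last element
theorem pv_g3 (w : List String) (h : w.length = 4) :
    PySem.List.pyGet? w 3 = PySem.List.pyGet? w (-1) := by
  have h3 : (3 : Int) = ((3 : Nat) : Int) := by norm_num
  rw [h3, PySem.List.pyGet?_natCast, PySem.List.pyGet?_neg_one,
    List.getLast?_eq_getElem?, h]

theorem pv_window (l : List String) (k : Nat) (hk : k + 4 ≤ l.length) :
    PySem.List.pyGet? l (4 + (k : Int) - 1) = PySem.List.pyGet? ((l.drop k).take 4) (-1) := by
  have h1 : (4 + (k : Int) - 1) = ((k + 3 : Nat) : Int) := by push_cast; ring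
  have hlen : ((l.drop k).take 4).length = 4 := by simp; omega
  rw [h1, PySem.List.pyGet?_natCast, PySem.List.pyGet?_neg_one, List.getLast?_eq_getElem?, hlen]
  simp only [List.getElem?_take, List.getElem?_drop]
  norm_num

-- Source B's loop, characterised: from cursor i it emits the rendered windows of the suffix
theorem pv_altLoop (l : List String) : ∀ (j i : Nat), j = l.length - i → ∀ out : List String,
    altLoopB l out i
      = out ++ (if (l.drop i).length ≤ 4
          then [renderB (l.drop i) (PySem.List.pyGet? (l.drop i) (-1))]
          else (List.range ((l.drop i).length - 3)).map (winB (l.drop i))) := by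
  intro j
  induction j with
  | zero =>
      intro i hij out
      rw [altLoopB, dif_neg (by omega)]
      rw [PySem.List.slice_from_natCast, if_pos (by simp; omega)]
  | succ j ih =>
      intro i hij out
      rw [altLoopB]
      by_cases h : (4 : Int) < (l.length : Int) - (i : Int)
      · rw [dif_pos h]
        have h4 : ((4:Nat) : Int) = (4 : Int) := by norm_num
        have hw : PySem.List.slice l (some (i : Int)) (some ((i : Int) + 4))
            = (l.drop i).take 4 := by
          rw [← h4, PySem.List.slice_natCast_add]
        refine (ih (i + 1) (by omega) _).trans ?_
        have htl : l.drop (i + 1) = (l.drop i).tail := List.tail_drop.symm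
        rw [htl, hw]
        set r := l.drop i with hr
        have hrlen : 4 < r.length := by rw [hr]; simp; omega
        have hx : ¬ r.length ≤ 4 := by omega
        rw [if_neg hx]
        have hlen : r.length - 3 = (r.tail.length - 3) + 1 := by
          simp [List.length_tail]; omega
        rw [hlen, List.range_succ_eq_map, List.map_cons, List.map_map]
        have h0 : winB r 0 = renderB (r.take 4) (PySem.List.pyGet? (r.take 4) 3) := rfl
        have hsucc : (winB r) ∘ Nat.succ = winB r.tail := by
          funext k
          have hdd : List.drop k r.tail = List.drop (k + 1) r := by
            rw [← List.drop_one, List.drop_drop, Nat.add_comm]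
          simp only [winB, Function.comp, hdd, Nat.succ_eq_add_one]
        rw [h0, hsucc]
        by_cases h4' : r.tail.length ≤ 4
        · have hx4 : r.tail.length = 4 := by simp [List.length_tail]; omega
          rw [if_pos h4']
          have hr1 : r.tail.length - 3 = 1 := by omega
          rw [hr1]
          have hwt : winB r.tail 0 = renderB r.tail (PySem.List.pyGet? r.tail (-1)) := by
            simp [winB, List.take_of_length_le (by omega : r.tail.length ≤ 4), pv_g3 r.tail hx4]
          simp [hwt, List.append_assoc]
        · rw [if_neg h4']
          simp [List.append_assoc]
      · rw [dif_neg h]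
        rw [PySem.List.slice_from_natCast, if_pos (by simp; omega)]

theorem pv_main (l : List String) : assign_screens l = assign_screens_alt l := by
  unfold assign_screens assign_screens_alt
  rw [pv_altLoop l l.length 0 (by omega), List.drop_zero, List.nil_append]
  simp only []
  by_cases h : l.length ≤ 4
  · rw [if_neg (by exact_mod_cast Nat.not_lt.mpr h), if_pos h]
    simp only [List.foldl_cons, List.foldl_nil, List.nil_append]
    have hsl : PySem.List.slice l (some 0) (some (l.length : Int)) = l := by
      rw [PySem.List.slice_toNat l (by norm_num) (Int.natCast_nonneg _)]
      simp
    rw [hsl, pv_renderB, String.empty_append, pv_last]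
  · rw [if_pos (by exact_mod_cast Nat.lt_of_not_le (by exact_mod_cast h)), if_neg h]
    rw [pv_buildIdx, PySem.List.length_pyRange_one]
    have hl : ((l.length : Int) - 3 - 0).toNat = l.length - 3 := by omega
    rw [hl, List.nil_append]
    rw [PySem.List.foldl_append_singleton_eq_map _ _ [], List.nil_append, List.map_map]
    apply List.map_congr_left
    intro k hk
    have hk' : k + 4 ≤ l.length := by
      have := List.mem_range.mp hk; omega
    simp only [Function.comp]
    have h0 : ((k:Int)).toNat = k := by omega
    have h4 : ((k:Int) + 4).toNat = k + 4 := by omega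
    have hsl : PySem.List.slice l (some (0 + (k:Int))) (some (4 + (k:Int))) = (l.drop k).take 4 := by
      rw [show (0 + (k:Int)) = (k:Int) by ring, show (4 + (k:Int)) = (k:Int) + 4 by ring]
      rw [PySem.List.slice_toNat l (Int.natCast_nonneg _) (by positivity), h0, h4,
        Nat.add_sub_cancel_left]
    simp only [hsl]
    rw [pv_renderB, String.empty_append]
    unfold winB
    congr 1
    have hlen : ((l.drop k).take 4).length = 4 := by simp; omega
    rw [pv_window l k hk', pv_g3 _ hlen]

-- ===== VERDICT (by name: the statement is the Claim_ definition above) =====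
theorem assign_screens_spec : Claim_equal_assign_screens := by
  intro l _
  unfold Spec_assign_screens
  exact pv_main l
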